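-- pv_equiv track=rewrite | github.com/PesseJinkman/unittest-rl | data/problems/L1/alternating_case/reference.py | alternating_case
-- ===== SOURCE A (Python) =====
-- def alternating_case(text):
--     result = []
--     upper_next = True
--     for ch in text:
--         if ch.isalpha():
--             if upper_next:
--                 result.append(ch.upper())
--             else:
--                 result.append(ch.lower())
--             upper_next = not upper_next
--         else:
--             result.append(ch)
--     return ''.join(result)
-- ===== SOURCE B (Python) =====
-- def alternating_case(text):
--     letters = [c for c in text if c.isalpha()]
--     cased = [c.upper() if i % 2 == 0 else c.lower() for i, c in enumerate(letters)]
--     it = iter(cased)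
--     return ''.join(next(it) if ch.isalpha() else ch for ch in text)
-- ===== Notes on version B (the rewrite author's own statement) =====
-- stated objective: alternative
-- what changed: Replaces the single flagged pass with a two-phase decomposition: collect the alphabetic characters, case them by index parity with enumerate, then splice them back into the text via an iterator cursor.
import Mathlib
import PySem

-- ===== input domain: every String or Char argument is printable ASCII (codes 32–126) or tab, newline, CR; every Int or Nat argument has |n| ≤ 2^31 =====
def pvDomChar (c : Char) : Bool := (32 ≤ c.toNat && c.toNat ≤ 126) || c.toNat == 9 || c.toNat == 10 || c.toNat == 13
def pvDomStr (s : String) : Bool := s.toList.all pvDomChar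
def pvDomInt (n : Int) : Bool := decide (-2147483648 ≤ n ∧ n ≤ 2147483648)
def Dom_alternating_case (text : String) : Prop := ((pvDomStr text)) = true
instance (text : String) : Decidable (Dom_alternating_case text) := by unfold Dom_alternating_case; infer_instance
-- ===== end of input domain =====

-- B rebuilds the result from a separately cased letter sequence instead of A's running boolean flag; same cost, different decomposition.

-- ===== PORT A =====
def alternating_case (text : String) : String :=
  String.mk ((text.toList.foldl (fun (st : List Char × Bool) ch =>
    if PySem.Chars.isalpha ch then
      (st.1 ++ [if st.2 then PySem.Chars.upperChar ch else PySem.Chars.lowerChar ch], !st.2)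
    else (st.1 ++ [ch], st.2)) ([], true)).1)

-- ===== PORT B =====
-- splice: emit the next cased letter at each alphabetic position, other chars unchanged
-- (the empty-cased branch is unreachable in B: `cased` has one entry per alphabetic char)
def pvSplice : List Char → List Char → List Char
  | [], _ => []
  | c :: rest, cs =>
    if PySem.Chars.isalpha c then
      match cs with
      | d :: ds => d :: pvSplice rest ds
      | [] => []
    else c :: pvSplice rest cs

def alternating_case_alt (text : String) : String :=
  String.mk (pvSplice text.toList
    ((PySem.List.enumerate (text.toList.filter PySem.Chars.isalpha) 0).map (fun p =>
      if PySem.Int.mod p.1 2 == 0 then PySem.Chars.upperChar p.2 else PySem.Chars.lowerChar p.2)))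

-- ===== PRECONDITION & SPEC =====
def Spec_alternating_case (text : String) (out : String) : Prop := out = alternating_case_alt text
instance (text : String) (out : String) : Decidable (Spec_alternating_case text out) := by unfold Spec_alternating_case; infer_instance

-- ===== CLAIM (what is proved, stated in full; the proofs are below) =====
def Claim_equal_alternating_case : Prop := ∀ (text : String), Dom_alternating_case text → Spec_alternating_case text (alternating_case text)

-- ===== LEMMAS AND PROOFS =====

-- the alternating-cased letter list, expressed with a running flag (proof device only)
def pvAltMap : List Char → Bool → List Char
  | [], _ => []
  | c :: cs, b => (if b then PySem.Chars.upperChar c else PySem.Chars.lowerChar c) :: pvAltMap cs (!b)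

lemma pv_enum_eq_altmap (ls : List Char) : ∀ s : Int, 0 ≤ s →
    (PySem.List.enumerate ls s).map (fun p =>
      if PySem.Int.mod p.1 2 == 0 then PySem.Chars.upperChar p.2 else PySem.Chars.lowerChar p.2)
      = pvAltMap ls (PySem.Int.mod s 2 == 0) := by
  induction ls with
  | nil => intro s _; simp [PySem.List.enumerate_nil, pvAltMap]
  | cons c cs ih =>
    intro s hs
    rw [PySem.List.enumerate_cons]
    have h2 : PySem.Int.mod s 2 = s % 2 := PySem.Int.mod_eq_emod_of_pos (by omega)
    have h2' : PySem.Int.mod (s + 1) 2 = (s + 1) % 2 := PySem.Int.mod_eq_emod_of_pos (by omega)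
    have hflip : (PySem.Int.mod (s + 1) 2 == 0) = !(PySem.Int.mod s 2 == 0) := by
      rw [h2, h2']
      rcases Int.emod_two_eq s with h | h <;> simp [h] <;> omega
    simp only [List.map_cons, pvAltMap, ih (s + 1) (by omega), hflip]

lemma pv_main (l : List Char) : ∀ (b : Bool) (acc : List Char),
    (l.foldl (fun (st : List Char × Bool) ch =>
      if PySem.Chars.isalpha ch then
        (st.1 ++ [if st.2 then PySem.Chars.upperChar ch else PySem.Chars.lowerChar ch], !st.2)
      else (st.1 ++ [ch], st.2)) (acc, b)).1
    = acc ++ pvSplice l (pvAltMap (l.filter PySem.Chars.isalpha) b) := by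
  induction l with
  | nil => intro b acc; simp [pvSplice]
  | cons c cs ih =>
    intro b acc
    by_cases h : PySem.Chars.isalpha c = true
    · simp only [List.foldl_cons, h, if_true, List.filter_cons_of_pos h, pvAltMap, pvSplice, ih]
      simp
    · simp only [List.foldl_cons, h, if_false, List.filter_cons_of_neg h, pvSplice, ih,
        Bool.false_eq_true]
      simp

-- ===== VERDICT (by name: the statement is the Claim_ definition above) =====
theorem alternating_case_spec : Claim_equal_alternating_case := by
  intro text _
  unfold Spec_alternating_case alternating_case alternating_case_alt
  rw [pv_main, pv_enum_eq_altmap _ 0 le_rfl]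
  rfl
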